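-- pv_equiv track=rewrite | github.com/jeeveesee/Bioinformatics | BI1/Wk_3/Wk3_7_greedy_motif_search_w_pseudocounts_EFFICIENT.py | score_motifs
-- ===== SOURCE A (Python) =====
-- def score_motifs(motifs):
--     k = len(motifs[0])
--     t = len(motifs)
--     score = 0
--
--     for j in range(k):
--         column = [motif[j] for motif in motifs]
--         # Don't need to find the nucleotide, just its count
--         most_frequent_count = max(column.count(nuc) for nuc in 'ATCG')
--         score += t - most_frequent_count # How many nucleotide are NOT the most frequent in this column
--
--     return score
-- ===== SOURCE B (Python) =====
-- def score_motifs(motifs):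
--     k = len(motifs[0])
--     t = len(motifs)
--     total = 0
--     for j in range(k):
--         # mode count of the column = longest run of equal chars in the sorted column
--         col = sorted(m[j] for m in motifs if m[j] in 'ATCG')
--         n = len(col)
--         best = 0
--         i = 0
--         while i < n:
--             r = i + 1
--             while r < n and col[r] == col[i]:
--                 r += 1
--             if r - i > best:
--                 best = r - i
--             i = r
--         total += t - best
--     return total
-- ===== Notes on version B (the rewrite author's own statement) =====
-- stated objective: alternative
-- what changed: A finds each column's mode count by four counting scans (column.count(nuc) for nuc in 'ATCG'); B never counts: it sorts each column's ATCG characters and takes the mode count as the longest run of equal characters in the sorted column, found by a two-pointer run scan.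
import Mathlib
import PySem

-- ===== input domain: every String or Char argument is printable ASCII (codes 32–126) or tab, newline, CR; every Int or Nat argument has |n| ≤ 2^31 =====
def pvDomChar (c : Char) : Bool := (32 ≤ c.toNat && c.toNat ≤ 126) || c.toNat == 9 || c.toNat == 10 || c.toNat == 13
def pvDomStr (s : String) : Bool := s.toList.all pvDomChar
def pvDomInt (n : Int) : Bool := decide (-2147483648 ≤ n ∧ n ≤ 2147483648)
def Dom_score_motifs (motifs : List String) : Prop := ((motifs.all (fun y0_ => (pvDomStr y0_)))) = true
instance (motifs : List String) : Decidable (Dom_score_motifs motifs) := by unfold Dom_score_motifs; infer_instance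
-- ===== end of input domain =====

-- B finds each column's mode count by sorting the column's ATCG characters and scanning for
-- the longest run of equal characters, instead of A's four counting scans per column
-- (objective: alternative algorithm, no speed claim).

-- ===== PORT A =====
-- literal port of A: for each j in range(k) build the column, take the max of the four
-- nucleotide counts (the chars of 'ATCG', in order), add t - max; max(<4 values>) is
-- PySem.List.max? of the 4-element list (never empty, so .getD 0 is never used).
def score_motifs (motifs : List String) : Int :=
  let k : Int := PySem.Str.len (motifs.headD "")
  let t : Int := (motifs.length : Int)
  (PySem.List.pyRange 0 k 1).foldl (fun score j =>
    let column := motifs.map (fun m => (PySem.Str.pyGet? m j).getD ' ')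
    let mfc := (PySem.List.max? ((['A','T','C','G']).map
        (fun nuc => (PySem.List.count column nuc : Int))) (fun x => x)).getD 0
    score + (t - mfc)) 0

-- ===== PORT B =====
-- Source B's nested while loops: the inner 'while r < n and col[r] == col[i]' scans the run of
-- characters equal to the head (a span: takeWhile/dropWhile), the outer loop jumps i to r;
-- 'if r - i > best' keeps the running maximum of the run lengths.
def pvLongestRun : List Char → Nat
  | [] => 0
  | c :: cs =>
    max ((cs.takeWhile (· == c)).length + 1) (pvLongestRun (cs.dropWhile (· == c)))
termination_by l => l.length
decreasing_by
  simp only [List.length_cons]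
  exact Nat.lt_succ_of_le (List.length_dropWhile_le _ _)

-- port of B: per column, sort the ATCG characters of the column and add t - longest run.
def score_motifs_alt (motifs : List String) : Int :=
  let k : Int := PySem.Str.len (motifs.headD "")
  let t : Int := (motifs.length : Int)
  (PySem.List.pyRange 0 k 1).foldl (fun total j =>
    let col := PySem.List.sorted
      (motifs.filterMap (fun m =>
        let c := (PySem.Str.pyGet? m j).getD ' '
        if c ∈ ['A','T','C','G'] then some c else none)) (fun x => x) false
    total + (t - (pvLongestRun col : Int))) 0

-- ===== PRECONDITION & SPEC =====
-- Pre_ excludes exactly the inputs where A raises IndexError: the empty list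
-- (motifs[0]) and lists where some motif is shorter than motifs[0] (motif[j]).
def Pre_score_motifs (motifs : List String) : Prop :=
  motifs ≠ [] ∧ ∀ m ∈ motifs, (motifs.headD "").toList.length ≤ m.toList.length
instance (motifs : List String) : Decidable (Pre_score_motifs motifs) := by
  unfold Pre_score_motifs; infer_instance

def pvWitness_score_motifs : List String := ["ATG", "AAG", "CTG"]

def Spec_score_motifs (motifs : List String) (out : Int) : Prop := out = score_motifs_alt motifs
instance (motifs : List String) (out : Int) : Decidable (Spec_score_motifs motifs out) := by unfold Spec_score_motifs; infer_instance

-- ===== CLAIM (what is proved, stated in full; the proofs are below) =====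
def Claim_equal_score_motifs : Prop := ∀ (motifs : List String), Dom_score_motifs motifs → Pre_score_motifs motifs → Spec_score_motifs motifs (score_motifs motifs)

-- ===== LEMMAS AND PROOFS =====

-- column j of the motif matrix (total version; under Pre_ the default ' ' is never used)
def pvCol (motifs : List String) (j : Nat) : List Char :=
  motifs.map (fun m => m.toList.getD j ' ')

-- the per-column term both programs add for column j
def pvTerm (motifs : List String) (j : Nat) : Int :=
  (motifs.length : Int) -
    (PySem.List.max? ((['A','T','C','G']).map
      (fun nuc => (PySem.List.count (pvCol motifs j) nuc : Int))) (fun x => x)).getD 0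

-- the span of a replicate block against a run-free tail
lemma pv_span_rep (x : Char) (rest : List Char) (h : x ∉ rest) (n : Nat) :
    (List.replicate n x ++ rest).takeWhile (· == x) = List.replicate n x ∧
    (List.replicate n x ++ rest).dropWhile (· == x) = rest := by
  induction n with
  | zero =>
    cases rest with
    | nil => simp
    | cons y ys =>
      have hy : (y == x) = false := by
        simp only [beq_eq_false_iff_ne]; rintro rfl; exact h (List.mem_cons_self ..)
      simp [hy]
  | succ n ih =>
    simp [List.replicate_succ, ih.1, ih.2]

lemma pv_run_rep (x : Char) (rest : List Char) (h : x ∉ rest) (n : Nat) :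
    pvLongestRun (List.replicate n x ++ rest) = max n (pvLongestRun rest) := by
  cases n with
  | zero => simp
  | succ n =>
    rw [List.replicate_succ, List.cons_append, pvLongestRun,
      (pv_span_rep x rest h n).1, (pv_span_rep x rest h n).2]
    simp

lemma pv_run_blocks (a c g t : Nat) :
    pvLongestRun (List.replicate a 'A' ++ (List.replicate c 'C' ++
      (List.replicate g 'G' ++ List.replicate t 'T'))) = max a (max c (max g t)) := by
  rw [pv_run_rep 'A' _ (by simp [List.mem_replicate]) a,
      pv_run_rep 'C' _ (by simp [List.mem_replicate]) c,
      pv_run_rep 'G' _ (by simp [List.mem_replicate]) g,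
      ← List.append_nil (List.replicate t 'T'),
      pv_run_rep 'T' _ (by simp) t]
  simp [pvLongestRun]

lemma pv_sorted_blocks (cs : List Char)
    (hcs : ∀ x ∈ cs, x = 'A' ∨ x = 'T' ∨ x = 'C' ∨ x = 'G') :
    PySem.List.sorted cs (fun x => x) false =
      List.replicate (cs.count 'A') 'A' ++ (List.replicate (cs.count 'C') 'C' ++
        (List.replicate (cs.count 'G') 'G' ++ List.replicate (cs.count 'T') 'T')) := by
  apply PySem.List.sorted_id_eq_of_perm_of_pairwise
  · rw [List.perm_iff_count]
    intro x
    by_cases hx : x = 'A' ∨ x = 'T' ∨ x = 'C' ∨ x = 'G'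
    · rcases hx with rfl | rfl | rfl | rfl <;>
        simp [List.count_append, List.count_replicate]
    · push Not at hx
      obtain ⟨h1, h2, h3, h4⟩ := hx
      have hz : List.count x cs = 0 :=
        List.count_eq_zero.mpr (fun hmemx => by rcases hcs x hmemx with h | h | h | h <;> tauto)
      simp [List.count_append, List.count_replicate, hz, Ne.symm h1, Ne.symm h2, Ne.symm h3,
        Ne.symm h4]
  · simp only [List.pairwise_append, List.pairwise_replicate, List.mem_append,
      List.mem_replicate]
    refine ⟨Or.inr le_rfl, ⟨Or.inr le_rfl, ⟨Or.inr le_rfl, Or.inr le_rfl, ?_⟩, ?_⟩, ?_⟩ <;>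
      · rintro a ⟨-, rfl⟩ b hb
        first
          | (rcases hb with ⟨-, rfl⟩ | ⟨-, rfl⟩ | ⟨-, rfl⟩ <;> decide)
          | (rcases hb with ⟨-, rfl⟩ | ⟨-, rfl⟩ <;> decide)
          | (rcases hb with ⟨-, rfl⟩; decide)

lemma pv_filterMap (l : List String) (g : String → Char) :
    l.filterMap (fun m =>
        let c := g m
        if c ∈ ['A','T','C','G'] then some c else none) =
      (l.map g).filter (fun c => decide (c ∈ ['A','T','C','G'])) := by
  induction l with
  | nil => rfl
  | cons m ms ih =>
    by_cases h : g m = 'A' ∨ g m = 'T' ∨ g m = 'C' ∨ g m = 'G' <;>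
      simp [h] <;> simpa using ih

lemma score_A_eq (motifs : List String) (h : Pre_score_motifs motifs) :
    score_motifs motifs =
      0 + ((List.range (motifs.headD "").toList.length).map (pvTerm motifs)).sum := by
  obtain ⟨hne, hall⟩ := h
  unfold score_motifs
  simp only [PySem.Str.len_eq]
  rw [PySem.List.pyRange_zero_nat, List.foldl_map, PySem.List.foldl_add]
  congr 1
  refine congrArg List.sum (List.map_congr_left ?_)
  intro jn hjn
  rw [List.mem_range] at hjn
  have hcol : (List.map (fun m => (PySem.Str.pyGet? m (jn:Int)).getD ' ') motifs) = pvCol motifs jn := by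
    apply List.map_congr_left
    intro m hm
    have hjm : jn < m.toList.length := lt_of_lt_of_le hjn (hall m hm)
    simp [PySem.Str.pyGet?]
  rw [hcol]
  rfl

lemma score_B_eq (motifs : List String) (h : Pre_score_motifs motifs) :
    score_motifs_alt motifs =
      0 + ((List.range (motifs.headD "").toList.length).map (pvTerm motifs)).sum := by
  obtain ⟨hne, hall⟩ := h
  unfold score_motifs_alt
  simp only [PySem.Str.len_eq]
  rw [PySem.List.pyRange_zero_nat, List.foldl_map, PySem.List.foldl_add]
  congr 1
  refine congrArg List.sum (List.map_congr_left ?_)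
  intro jn hjn
  rw [List.mem_range] at hjn
  have hcol : (List.map (fun m => (PySem.Str.pyGet? m (jn:Int)).getD ' ') motifs) = pvCol motifs jn := by
    apply List.map_congr_left
    intro m hm
    have hjm : jn < m.toList.length := lt_of_lt_of_le hjn (hall m hm)
    simp [PySem.Str.pyGet?]
  rw [pv_filterMap motifs (fun m => (PySem.Str.pyGet? m (jn:Int)).getD ' '), hcol]
  set cs := (pvCol motifs jn).filter (fun c => decide (c ∈ ['A','T','C','G'])) with hcs
  have hmem : ∀ x ∈ cs, x = 'A' ∨ x = 'T' ∨ x = 'C' ∨ x = 'G' := by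
    intro x hx
    rw [hcs, List.mem_filter] at hx
    simpa using hx.2
  rw [pv_sorted_blocks cs hmem, pv_run_blocks]
  have hcount : ∀ nuc : Char, decide (nuc ∈ ['A','T','C','G']) = true →
      List.count nuc cs = List.count nuc (pvCol motifs jn) := by
    intro nuc hnuc
    rw [hcs]
    exact List.count_filter (p := fun c => decide (c ∈ ['A','T','C','G'])) hnuc
  rw [hcount 'A' (by decide), hcount 'C' (by decide), hcount 'G' (by decide),
    hcount 'T' (by decide)]
  unfold pvTerm
  congr 1
  simp only [List.map_cons, List.map_nil]
  rw [PySem.List.max?_id_cons]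
  simp only [List.foldl, Option.getD_some, PySem.List.count_eq]
  rw [Nat.cast_max, Nat.cast_max, Nat.cast_max]
  rw [max_def, max_def, max_def, max_def, max_def, max_def]
  split_ifs <;> omega

-- ===== VERDICT (by name: the statement is the Claim_ definition above) =====
theorem score_motifs_spec : Claim_equal_score_motifs := by
  intro motifs _ hpre
  unfold Spec_score_motifs
  rw [score_A_eq motifs hpre, score_B_eq motifs hpre]
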